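-- pv_equiv track=rewrite | github.com/jul-ienfr/Swarm | prediction_markets/market_graph.py | _question_tokens
-- ===== SOURCE A (Python) =====
-- def _question_tokens(question: str) -> set[str]:
--     stopwords = {
--         "will",
--         "the",
--         "a",
--         "an",
--         "by",
--         "in",
--         "on",
--         "of",
--         "for",
--         "to",
--         "be",
--         "is",
--         "are",
--         "does",
--         "do",
--         "did",
--         "this",
--         "that",
--         "it",
--         "happen",
--         "happens",
--         "occur",
--         "occur?",
--         "market",
--         "above",
--         "below",
--         "than",
--     }
--     cleaned = "".join(ch.lower() if ch.isalnum() else " " for ch in question)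
--     tokens = {token for token in cleaned.split() if token and token not in stopwords}
--     return tokens
-- ===== SOURCE B (Python) =====
-- def _question_tokens(question: str) -> set[str]:
--     stopwords = {
--         "will", "the", "a", "an", "by", "in", "on", "of", "for", "to",
--         "be", "is", "are", "does", "do", "did", "this", "that", "it",
--         "happen", "happens", "occur", "occur?", "market", "above",
--         "below", "than",
--     }
--     tokens = set()
--     cur = []
--
--     def flush():
--         if cur:
--             tok = "".join(cur)
--             if tok not in stopwords:
--                 tokens.add(tok)
--             cur.clear()
--
--     for ch in question:
--         if ch.isalnum():
--             cur.append(ch.lower())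
--         else:
--             flush()
--     flush()
--     return tokens
-- ===== Notes on version B (the rewrite author's own statement) =====
-- stated objective: idiomatic
-- what changed: Single pass over the characters accumulating alnum runs and flushing each run as a token, instead of building an intermediate space-cleaned string and then splitting it.
import Mathlib
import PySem

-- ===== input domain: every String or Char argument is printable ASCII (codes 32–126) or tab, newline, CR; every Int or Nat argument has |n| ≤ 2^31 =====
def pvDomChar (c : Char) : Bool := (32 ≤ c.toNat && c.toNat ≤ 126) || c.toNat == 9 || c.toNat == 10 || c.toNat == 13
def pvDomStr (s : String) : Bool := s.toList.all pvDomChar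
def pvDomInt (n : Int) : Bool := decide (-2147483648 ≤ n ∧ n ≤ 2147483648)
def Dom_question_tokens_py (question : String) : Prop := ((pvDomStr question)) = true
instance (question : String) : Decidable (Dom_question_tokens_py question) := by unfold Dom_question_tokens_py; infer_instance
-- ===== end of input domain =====

-- B replaces A's "clean then split" with a single accumulating pass over the characters (idiomatic/alternative decomposition; same cost).

-- the stopword set, shared verbatim by both ports
def qtStopwords : List String :=
  ["will", "the", "a", "an", "by", "in", "on", "of", "for", "to",
   "be", "is", "are", "does", "do", "did", "this", "that", "it",
   "happen", "happens", "occur", "occur?", "market", "above",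
   "below", "than"]

-- ===== PORT A =====
def question_tokens_py (question : String) : List String :=
  let cleaned : String :=
    String.ofList (question.toList.map
      (fun ch => if PySem.Chars.isalnum ch then PySem.Chars.lowerChar ch else ' '))
  PySem.Set.ofList
    ((PySem.Str.split₀ cleaned).filter
      (fun token => (token != "") && !(qtStopwords.contains token)))

-- ===== PORT B =====
-- flush(): emit the current run (if any) as a token unless it is a stopword
def qtFlush (cur : List Char) (s : PySem.Set String) : PySem.Set String :=
  if cur = [] then s
  else
    let tok := String.ofList cur
    if qtStopwords.contains tok then s else PySem.Set.add s tok

-- the single pass: accumulate lowered alnum chars, flush at each non-alnum char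
def qtGo : List Char → List Char → PySem.Set String → PySem.Set String
  | [], cur, s => qtFlush cur s
  | ch :: rest, cur, s =>
      if PySem.Chars.isalnum ch then qtGo rest (cur ++ [PySem.Chars.lowerChar ch]) s
      else qtGo rest [] (qtFlush cur s)

def question_tokens_py_alt (question : String) : List String :=
  qtGo question.toList [] PySem.Set.empty

-- ===== PRECONDITION & SPEC =====
def Spec_question_tokens_py (question : String) (out : List String) : Prop := out = question_tokens_py_alt question
instance (question : String) (out : List String) : Decidable (Spec_question_tokens_py question out) := by unfold Spec_question_tokens_py; infer_instance

-- ===== CLAIM (what is proved, stated in full; the proofs are below) =====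
def Claim_equal_question_tokens_py : Prop := ∀ (question : String), Dom_question_tokens_py question → Spec_question_tokens_py question (question_tokens_py question)

-- ===== LEMMAS AND PROOFS =====

-- A's post-split fold step, after pushing the filter into the fold
def qtStepA (s : PySem.Set String) (t : String) : PySem.Set String :=
  if (t != "") && !(qtStopwords.contains t) then PySem.Set.add s t else s

-- a lowered alphanumeric character is not whitespace
theorem qt_lower_alnum_not_space (c : Char) (h : PySem.Chars.isalnum c = true) :
    PySem.Chars.isspace (PySem.Chars.lowerChar c) = false := by
  unfold PySem.Chars.lowerChar
  split
  · next hu =>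
    have hu' : 65 ≤ c.toNat ∧ c.toNat ≤ 90 := by
      simp only [PySem.Chars.isupper, Bool.and_eq_true, decide_eq_true_eq, Char.le_def,
        UInt32.le_iff_toNat_le, Char.toNat] at hu ⊢
      exact hu
    have hv : (c.toNat + 32).isValidChar := Or.inl (by omega)
    simp only [PySem.Chars.isspace, Char.toNat_ofNat, if_pos hv]
    simp only [Bool.or_eq_false_iff, Bool.and_eq_false_iff, decide_eq_false_iff_not]
    omega
  · next hu =>
    have h' : (48 ≤ c.toNat ∧ c.toNat ≤ 57) ∨ (65 ≤ c.toNat ∧ c.toNat ≤ 90) ∨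
        (97 ≤ c.toNat ∧ c.toNat ≤ 122) := by
      simp only [PySem.Chars.isalnum, PySem.Chars.isalpha, PySem.Chars.isdigit,
        PySem.Chars.isupper, PySem.Chars.islower, Bool.or_eq_true, Bool.and_eq_true,
        decide_eq_true_eq, Char.le_def, UInt32.le_iff_toNat_le] at h
      tauto
    simp only [PySem.Chars.isspace, Char.toNat]
    simp only [Bool.or_eq_false_iff, Bool.and_eq_false_iff, decide_eq_false_iff_not]
    simp only [Char.toNat] at h'
    omega

-- split₀.go's accumulator pulls out in front
theorem qt_go_acc (cs : List Char) (cur : List (Char)) (acc : List (List Char)) :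
    PySem.Chars.split₀.go cs cur acc = acc.reverse ++ PySem.Chars.split₀.go cs cur [] := by
  induction cs generalizing cur acc with
  | nil =>
    simp only [PySem.Chars.split₀.go]
    by_cases h : cur.isEmpty <;> simp [h]
  | cons c rest ih =>
    simp only [PySem.Chars.split₀.go]
    by_cases hs : PySem.Chars.isspace c <;> by_cases hc : cur.isEmpty <;>
      simp only [hs, hc, if_true, if_false, Bool.false_eq_true]
    · exact ih [] acc
    · rw [ih [] (cur.reverse :: acc), ih [] [cur.reverse]]
      simp
    · exact ih (c :: cur) acc
    · exact ih (c :: cur) acc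

-- flushing a run equals A's step on the corresponding token
theorem qt_flush_eq (cur : List Char) (s : PySem.Set String) (h : cur ≠ []) :
    qtFlush cur s = qtStepA s (String.ofList cur) := by
  match cur, h with
  | a :: l, _ =>
    have hne : (String.ofList (a :: l) != "") = true := by
      rw [bne_iff_ne]; intro hx
      have := congrArg String.toList hx
      simp at this
    simp only [qtFlush, qtStepA, if_neg (List.cons_ne_nil a l), hne, Bool.true_and]
    by_cases hstop : qtStopwords.contains (String.ofList (a :: l)) <;> simp

-- main invariant: the single pass equals folding A's step over the split of the mapped remainder
theorem qt_main (cs : List Char) (cur : List Char) (s : PySem.Set String) :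
    qtGo cs cur s =
      ((PySem.Chars.split₀.go
          (cs.map (fun ch => if PySem.Chars.isalnum ch then PySem.Chars.lowerChar ch else ' '))
          cur.reverse []).map String.ofList).foldl qtStepA s := by
  induction cs generalizing cur s with
  | nil =>
    match cur with
    | [] => simp [qtGo, qtFlush, PySem.Chars.split₀.go]
    | a :: l =>
      have h1 : ((a :: l).reverse.isEmpty) = false := by simp
      simp only [qtGo, List.map_nil, PySem.Chars.split₀.go, h1, Bool.false_eq_true,
        if_false, List.reverse_nil, List.reverse_reverse, List.map_cons, List.map_nil,
        List.foldl_cons, List.foldl_nil]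
      exact qt_flush_eq (a :: l) s (List.cons_ne_nil a l)
  | cons c rest ih =>
    by_cases ha : PySem.Chars.isalnum c
    · have hns := qt_lower_alnum_not_space c ha
      simp only [qtGo, ha, if_true, List.map_cons, PySem.Chars.split₀.go, hns,
        Bool.false_eq_true, if_false]
      rw [ih (cur ++ [PySem.Chars.lowerChar c]) s]
      simp
    · have hsp : PySem.Chars.isspace ' ' = true := by decide
      simp only [qtGo, ha, Bool.false_eq_true, if_false, List.map_cons,
        PySem.Chars.split₀.go, hsp, if_true]
      match cur with
      | [] =>
        have : ([] : List Char).reverse.isEmpty = true := by simp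
        simp only [List.reverse_nil, List.isEmpty_nil, if_true]
        rw [ih [] (qtFlush [] s)]
        simp [qtFlush]
      | a :: l =>
        have h1 : ((a :: l).reverse.isEmpty) = false := by simp
        simp only [h1, Bool.false_eq_true, if_false]
        rw [ih [] (qtFlush (a :: l) s), qt_go_acc _ [] [(a :: l).reverse.reverse]]
        simp only [List.reverse_cons, List.reverse_nil, List.nil_append, List.map_append,
          List.map_cons, List.map_nil, List.foldl_append, List.foldl_cons, List.foldl_nil]
        rw [qt_flush_eq (a :: l) s (List.cons_ne_nil a l)]
        simp

-- ===== VERDICT (by name: the statement is the Claim_ definition above) =====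
theorem question_tokens_py_spec : Claim_equal_question_tokens_py := by
  intro q _
  unfold Spec_question_tokens_py question_tokens_py question_tokens_py_alt
  rw [qt_main q.toList [] PySem.Set.empty]
  simp only [PySem.Str.split₀, String.toList_ofList, PySem.Chars.split₀,
    PySem.Set.ofList, List.foldl_filter, List.reverse_nil]
  rfl
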